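-- pv_equiv track=rewrite | github.com/Binitjha2000/RAG_COGNI | model_manager.py | _create_context_chunks
-- ===== SOURCE A (Python) =====
-- from typing import Dict, Any, Tuple, List, Optional, Set, Union
-- from dataclasses import dataclass
--
-- @dataclass
-- class LLMConstants:
--     """Constants for LLM processing"""
--     MIN_CONTEXT_LENGTH: int = 10
--     MIN_MEANINGFUL_CONTENT_LENGTH: int = 5
--     MIN_CHUNK_LENGTH: int = 50
--     MIN_LINE_LENGTH: int = 15
--     MAX_RELEVANT_SENTENCES: int = 10
--     MAX_SKILLS_PER_CATEGORY: int = 8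
--     MIN_RESPONSE_LENGTH: int = 100
--     MAX_SENTENCES_FOR_SHORT_RESPONSE: int = 6
--     MAX_SENTENCES_FOR_LONG_RESPONSE: int = 12
--     MIN_COMMA_COUNT_FOR_LIST: int = 3
--     TECHNICAL_BOOST_SCORE: int = 3
--     EXACT_MATCH_BOOST: int = 2
--     PARTIAL_MATCH_BOOST: int = 1
--
-- def _create_context_chunks(context: str) -> List[str]:
--     """Create meaningful chunks from context"""
--     chunks = []
--     lines = context.split('\n')
--     current_chunk = ""
--
--     for line in lines:
--         line = line.strip()
--         if len(line) > 5:
--             current_chunk += " " + line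
--
--             # Create chunk when it's substantial or at sentence end
--             if (len(current_chunk) > LLMConstants.MIN_CHUNK_LENGTH and
--                 (line.endswith('.') or line.endswith('!') or line.endswith('?'))):
--                 chunks.append(current_chunk.strip())
--                 current_chunk = ""
--
--     # Add remaining chunk
--     if current_chunk.strip():
--         chunks.append(current_chunk.strip())
--
--     # Also include individual substantial lines
--     for line in lines:
--         line = line.strip()
--         if len(line) > LLMConstants.MIN_LINE_LENGTH:
--             chunks.append(line)
--
--     return list(set(chunks))  # Remove duplicates
-- ===== SOURCE B (Python) =====
-- from typing import List
--
-- def _create_context_chunks(context: str) -> List[str]: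
--     """Create meaningful chunks from context.
--
--     Different decomposition: strip once, filter the >5-char lines up front, then
--     build chunks by recursively SPLITTING that list at the first flush boundary
--     (prefix-length scan + slice + join), instead of A's fold that grows a string
--     accumulator line by line."""
--     stripped = [raw.strip() for raw in context.split('\n')]
--     big = [l for l in stripped if len(l) > 5]
--
--     def split_chunks(ls: List[str]) -> List[str]:
--         total = 0
--         for i, l in enumerate(ls):
--             total += len(l) + 1
--             if total > 50 and l[-1] in '.!?':
--                 return [' '.join(ls[:i + 1])] + split_chunks(ls[i + 1:])
--         return [' '.join(ls)] if ls else []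
--
--     chunks = split_chunks(big) + [l for l in stripped if len(l) > 15]
--     return list(set(chunks))
-- ===== Notes on version B (the rewrite author's own statement) =====
-- stated objective: alternative
-- what changed: B strips and filters the substantial (>5-char) lines up front and then builds chunks by recursively splitting that list at the first flush boundary found by a prefix-length scan (slice + join per chunk), instead of A's single fold that grows a string accumulator line by line and flushes it in place; the >15-char lines are a filter comprehension instead of a second appending loop.
import Mathlib
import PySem

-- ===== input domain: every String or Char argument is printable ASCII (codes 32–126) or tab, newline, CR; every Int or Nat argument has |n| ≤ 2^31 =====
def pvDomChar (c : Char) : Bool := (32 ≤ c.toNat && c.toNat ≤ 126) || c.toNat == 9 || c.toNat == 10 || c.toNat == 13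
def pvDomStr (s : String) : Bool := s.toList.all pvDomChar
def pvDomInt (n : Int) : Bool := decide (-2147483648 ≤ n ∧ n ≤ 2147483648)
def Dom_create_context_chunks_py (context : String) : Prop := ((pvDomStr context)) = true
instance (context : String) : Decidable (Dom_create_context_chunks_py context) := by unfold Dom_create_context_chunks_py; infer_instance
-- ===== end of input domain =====

-- B filters the substantial lines first and builds chunks by recursively splitting that
-- list at the first flush boundary (prefix-length scan, slice, join), instead of A's fold
-- growing a string accumulator; objective: alternative decomposition, same cost.

-- ===== PORT A =====
-- the flush logic of A's loop body (applied once the stripped line passed the > 5 test)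
def pvCore (st : List (List Char) × List Char) (line : List Char) :
    List (List Char) × List Char :=
  let cur := st.2 ++ ' ' :: line
  if 50 < cur.length &&
      (PySem.Chars.endswith line ['.'] || PySem.Chars.endswith line ['!'] ||
       PySem.Chars.endswith line ['?']) then
    (st.1 ++ [PySem.Chars.strip cur], [])
  else
    (st.1, cur)

-- one iteration of A's first loop: state = (chunks, current_chunk)
def pvAstep (st : List (List Char) × List Char) (raw : List Char) :
    List (List Char) × List Char :=
  let line := PySem.Chars.strip raw
  if 5 < line.length then pvCore st line else st

def create_context_chunks_py (context : String) : List String :=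
  let lines := PySem.Chars.splitOn context.toList ['\n']
  let st := lines.foldl pvAstep ([], [])
  let chunks := if PySem.Chars.strip st.2 ≠ [] then st.1 ++ [PySem.Chars.strip st.2] else st.1
  let chunks := lines.foldl
    (fun ch raw =>
      let line := PySem.Chars.strip raw
      if 15 < line.length then ch ++ [line] else ch) chunks
  (PySem.Set.ofList chunks).map String.ofList

-- ===== PORT B =====
-- line[-1] in '.!?'
def pvPunct (l : List Char) : Bool :=
  (PySem.List.pyGet? l (-1)).elim false fun c => c == '.' || c == '!' || c == '?'

-- the prefix-length scan of B's split_chunks: index of the first flush boundary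
def pvFirstBreak : Nat → List (List Char) → Option Nat
  | _, [] => none
  | total, l :: rest =>
    let t := total + l.length + 1
    if 50 < t && pvPunct l then some 0
    else (pvFirstBreak t rest).map (· + 1)

theorem pvFirstBreak_ne_nil {t : Nat} {ls : List (List Char)} {i : Nat}
    (h : pvFirstBreak t ls = some i) : ls ≠ [] := by
  cases ls with
  | nil => simp [pvFirstBreak] at h
  | cons a b => simp

-- B's recursive split_chunks: slice at the first boundary, join, recurse on the rest
def pvSplitChunks (ls : List (List Char)) : List (List Char) :=
  match h : pvFirstBreak 0 ls with
  | some i =>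
      PySem.Chars.join [' '] (ls.take (i + 1)) :: pvSplitChunks (ls.drop (i + 1))
  | none => if ls ≠ [] then [PySem.Chars.join [' '] ls] else []
termination_by ls.length
decreasing_by
  have hne := pvFirstBreak_ne_nil h
  have : 0 < ls.length := List.length_pos_iff.mpr hne
  simp [List.length_drop]
  omega

def create_context_chunks_py_alt (context : String) : List String :=
  let stripped := (PySem.Chars.splitOn context.toList ['\n']).map PySem.Chars.strip
  let big := stripped.filter (fun l => decide (5 < l.length))
  let chunks := pvSplitChunks big ++ stripped.filter (fun l => decide (15 < l.length))
  (PySem.Set.ofList chunks).map String.ofList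

-- ===== PRECONDITION & SPEC =====
def Spec_create_context_chunks_py (context : String) (out : List String) : Prop := out = create_context_chunks_py_alt context
instance (context : String) (out : List String) : Decidable (Spec_create_context_chunks_py context out) := by unfold Spec_create_context_chunks_py; infer_instance

-- ===== CLAIM (what is proved, stated in full; the proofs are below) =====
def Claim_equal_create_context_chunks_py : Prop := ∀ (context : String), Dom_create_context_chunks_py context → Spec_create_context_chunks_py context (create_context_chunks_py context)

-- ===== LEMMAS AND PROOFS =====

-- a "clean" line: nonempty, no leading and no trailing whitespace
def pvOk (g : List Char) : Prop :=
  g ≠ [] ∧ (∀ c, g.head? = some c → PySem.Chars.isspace c = false)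
        ∧ (∀ c, g.getLast? = some c → PySem.Chars.isspace c = false)

-- A's current_chunk, reconstructed from the list of accumulated pieces
def pvGlue (gr : List (List Char)) : List Char := gr.flatMap (fun g => ' ' :: g)

-- finalize A's first-loop state: flush the leftover chunk
def pvFin (st : List (List Char) × List Char) : List (List Char) :=
  if PySem.Chars.strip st.2 ≠ [] then st.1 ++ [PySem.Chars.strip st.2] else st.1

-- reference recursion: pending group gr, remaining (pre-stripped, substantial) lines
def pvGo : List (List Char) → List (List Char) → List (List Char)
  | gr, [] => if gr = [] then [] else [PySem.Chars.join [' '] gr]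
  | gr, l :: rest =>
    let gr' := gr ++ [l]
    if 50 < (pvGlue gr').length && pvPunct l then
      PySem.Chars.join [' '] gr' :: pvGo [] rest
    else
      pvGo gr' rest

theorem pv_head_dropWhile {p : Char → Bool} :
    ∀ (l : List Char) (c : Char), ((l.dropWhile p).head? = some c) → p c = false := by
  intro l
  induction l with
  | nil => intro c h; simp at h
  | cons a t ih =>
    intro c h
    by_cases hp : p a
    · rw [List.dropWhile_cons_of_pos hp] at h; exact ih c h
    · rw [List.dropWhile_cons_of_neg hp] at h
      simp at h; rw [← h]; simpa using hp

theorem pv_dropWhile_eq_self {p : Char → Bool} {l : List Char}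
    (h : ∀ c, l.head? = some c → p c = false) : l.dropWhile p = l := by
  cases l with
  | nil => rfl
  | cons a t => exact List.dropWhile_cons_of_neg (by simp [h a rfl])

theorem pv_rstrip_prefix (x : List Char) : PySem.Chars.rstrip x <+: x := by
  have h := List.dropWhile_suffix (l := x.reverse) PySem.Chars.isspace
  have := List.reverse_prefix.mpr (by simpa using h)
  simpa [PySem.Chars.rstrip] using this

theorem pv_head_prefix {l₁ l₂ : List Char} (h : l₁ <+: l₂) (hne : l₁ ≠ []) :
    l₂.head? = l₁.head? := by
  obtain ⟨t, rfl⟩ := h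
  exact List.head?_append_of_ne_nil _ hne

theorem pv_ok_strip (raw : List Char) (h : PySem.Chars.strip raw ≠ []) :
    pvOk (PySem.Chars.strip raw) := by
  refine ⟨h, ?_, ?_⟩
  · intro c hc
    have hpre : PySem.Chars.strip raw <+: PySem.Chars.lstrip raw :=
      pv_rstrip_prefix (PySem.Chars.lstrip raw)
    have : (PySem.Chars.lstrip raw).head? = some c := by
      rw [pv_head_prefix hpre h]; exact hc
    exact pv_head_dropWhile raw c (by simpa [PySem.Chars.lstrip] using this)
  · intro c hc
    have hc' : ((PySem.Chars.lstrip raw).reverse.dropWhile PySem.Chars.isspace).head? = some c := by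
      have hstrip : PySem.Chars.strip raw =
          ((PySem.Chars.lstrip raw).reverse.dropWhile PySem.Chars.isspace).reverse := rfl
      rw [hstrip, List.getLast?_reverse] at hc
      exact hc
    exact pv_head_dropWhile _ _ hc'

theorem pv_glue_cons (g : List Char) (gs : List (List Char)) :
    pvGlue (g :: gs) = ' ' :: PySem.Chars.join [' '] (g :: gs) := by
  induction gs generalizing g with
  | nil => simp [pvGlue, PySem.Chars.join_singleton]
  | cons b t ih =>
    have : pvGlue (g :: b :: t) = ' ' :: g ++ pvGlue (b :: t) := by
      simp [pvGlue]
    rw [this, ih b, PySem.Chars.join_cons_cons]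
    simp

theorem pv_head_join (g : List Char) (gs : List (List Char)) (hg : g ≠ []) :
    (PySem.Chars.join [' '] (g :: gs)).head? = g.head? := by
  cases gs with
  | nil => rw [PySem.Chars.join_singleton]
  | cons b t =>
    rw [PySem.Chars.join_cons_cons]
    rw [List.append_assoc]
    exact List.head?_append_of_ne_nil _ hg

theorem pv_join_ne_nil (g : List Char) (gs : List (List Char)) (hg : g ≠ []) :
    PySem.Chars.join [' '] (g :: gs) ≠ [] := by
  intro hnil
  have := pv_head_join g gs hg
  rw [hnil] at this
  cases g with
  | nil => exact hg rfl
  | cons a t => simp at this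

theorem pv_getLast_join : ∀ (gs : List (List Char)) (g : List Char), (∀ x ∈ g :: gs, pvOk x) →
    ∃ e ∈ g :: gs, (PySem.Chars.join [' '] (g :: gs)).getLast? = e.getLast? := by
  intro gs
  induction gs with
  | nil =>
    intro g _; exact ⟨g, by simp, by rw [PySem.Chars.join_singleton]⟩
  | cons b t ih =>
    intro g hok
    obtain ⟨e, he, hlast⟩ := ih b (fun x hx => hok x (by simp at hx ⊢; tauto))
    have hjne : PySem.Chars.join [' '] (b :: t) ≠ [] :=
      pv_join_ne_nil b t (hok b (by simp)).1
    refine ⟨e, by simp at he ⊢; tauto, ?_⟩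
    rw [PySem.Chars.join_cons_cons, List.append_assoc,
      List.getLast?_append_of_ne_nil _ (by simp),
      List.getLast?_append_of_ne_nil _ hjne, hlast]

theorem pv_strip_glue (gr : List (List Char)) (h : ∀ g ∈ gr, pvOk g) :
    PySem.Chars.strip (pvGlue gr) = PySem.Chars.join [' '] gr := by
  cases gr with
  | nil => simp only [PySem.Chars.join_nil]; rfl
  | cons g gs =>
    rw [pv_glue_cons]
    have hg : g ≠ [] := (h g (by simp)).1
    have hhead : ∀ c, (PySem.Chars.join [' '] (g :: gs)).head? = some c →
        PySem.Chars.isspace c = false := by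
      intro c hc
      rw [pv_head_join g gs hg] at hc
      exact (h g (by simp)).2.1 c hc
    have hlast : ∀ c, (PySem.Chars.join [' '] (g :: gs)).getLast? = some c →
        PySem.Chars.isspace c = false := by
      intro c hc
      obtain ⟨e, he, hl⟩ := pv_getLast_join gs g h
      rw [hl] at hc
      exact (h e he).2.2 c hc
    show PySem.Chars.rstrip (PySem.Chars.lstrip _) = _
    have h1 : PySem.Chars.lstrip (' ' :: PySem.Chars.join [' '] (g :: gs)) =
        PySem.Chars.join [' '] (g :: gs) := by
      show List.dropWhile _ _ = _
      rw [List.dropWhile_cons_of_pos (by decide)]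
      exact pv_dropWhile_eq_self hhead
    rw [h1]
    show (List.dropWhile _ _).reverse = _
    rw [pv_dropWhile_eq_self (fun c hc => hlast c (by rwa [← List.getLast?_reverse,
      List.reverse_reverse] at hc))]
    exact List.reverse_reverse _

theorem pv_pyGet_neg_one (l : List Char) (h : l ≠ []) :
    PySem.List.pyGet? l (-1) = l.getLast? := by
  have hlen : 1 ≤ l.length := List.length_pos_iff.mpr h
  simp [PySem.List.pyGet?, PySem.List.pyIdx?, hlen, List.getLast?_eq_getElem?]

theorem pv_endswith_singleton (l : List Char) (c : Char) :
    PySem.Chars.endswith l [c] = (l.getLast? == some c) := by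
  cases hx : PySem.Chars.endswith l [c]
  · have hns : ¬ [c] <:+ l := fun hs => by
      simp [(PySem.Chars.endswith_iff _ _).mpr hs] at hx
    have hne : l.getLast? ≠ some c := by
      intro h
      obtain ⟨l', rfl⟩ := List.getLast?_eq_some_iff.mp h
      exact hns ⟨l', rfl⟩
    symm
    rw [beq_eq_false_iff_ne]
    exact hne
  · obtain ⟨t, rfl⟩ := (PySem.Chars.endswith_iff _ _).mp hx
    simp

theorem pv_cond_eq (line : List Char) (h : line ≠ []) :
    (PySem.Chars.endswith line ['.'] || PySem.Chars.endswith line ['!'] ||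
      PySem.Chars.endswith line ['?']) = pvPunct line := by
  rw [pvPunct, pv_pyGet_neg_one line h]
  obtain ⟨c, hc⟩ : ∃ c, line.getLast? = some c := by
    cases hl : line.getLast?
    · exact absurd (List.getLast?_eq_none_iff.mp hl) h
    · exact ⟨_, rfl⟩
  rw [hc, pv_endswith_singleton, pv_endswith_singleton, pv_endswith_singleton, hc]
  simp [Option.elim]

theorem pv_glue_append (gr : List (List Char)) (l : List Char) :
    pvGlue (gr ++ [l]) = pvGlue gr ++ ' ' :: l := by
  simp [pvGlue]

-- A's first loop over raw lines = pvCore folded over the stripped substantial lines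
theorem pv_filter_fold (lines : List (List Char)) :
    ∀ st, lines.foldl pvAstep st =
      ((lines.map PySem.Chars.strip).filter (fun l => decide (5 < l.length))).foldl pvCore st := by
  induction lines with
  | nil => intro st; rfl
  | cons r t ih =>
    intro st
    by_cases h : 5 < (PySem.Chars.strip r).length
    · simp [pvAstep, h, ih]
    · simp [pvAstep, h, ih]

-- the folded-and-finalized A state equals pvGo
theorem pv_core_go : ∀ (bs : List (List Char)) (ch gr : List (List Char)),
    (∀ g ∈ gr, pvOk g) → (∀ l ∈ bs, pvOk l) →
    pvFin (bs.foldl pvCore (ch, pvGlue gr)) = ch ++ pvGo gr bs := by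
  intro bs
  induction bs with
  | nil =>
    intro ch gr hgr _
    show pvFin (ch, pvGlue gr) = ch ++ pvGo gr []
    cases gr with
    | nil => simp [pvFin, pvGo, pvGlue]; rfl
    | cons g gs =>
      have hs : PySem.Chars.strip (pvGlue (g :: gs)) = PySem.Chars.join [' '] (g :: gs) :=
        pv_strip_glue _ hgr
      have hne : PySem.Chars.join [' '] (g :: gs) ≠ [] :=
        pv_join_ne_nil g gs (hgr g (by simp)).1
      simp [pvFin, hs, hne, pvGo]
  | cons l rest ih =>
    intro ch gr hgr hbs
    have hl : pvOk l := hbs l (by simp)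
    have hgr' : ∀ g ∈ gr ++ [l], pvOk g := by
      intro g hg
      rcases List.mem_append.mp hg with hg | hg
      · exact hgr g hg
      · simp at hg; rwa [hg]
    have hcur : pvGlue gr ++ ' ' :: l = pvGlue (gr ++ [l]) := (pv_glue_append gr l).symm
    have hcond : (decide (50 < (pvGlue gr ++ ' ' :: l).length) &&
        (PySem.Chars.endswith l ['.'] || PySem.Chars.endswith l ['!'] ||
         PySem.Chars.endswith l ['?']))
        = (decide (50 < (pvGlue (gr ++ [l])).length) && pvPunct l) := by
      rw [hcur, pv_cond_eq l hl.1]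
    show pvFin (rest.foldl pvCore (pvCore (ch, pvGlue gr) l)) = ch ++ pvGo gr (l :: rest)
    rw [pvCore, pvGo]
    simp only
    rw [hcond]
    by_cases hc : (decide (50 < (pvGlue (gr ++ [l])).length) && pvPunct l) = true
    · rw [if_pos hc, if_pos hc]
      have : (ch ++ [PySem.Chars.strip (pvGlue gr ++ ' ' :: l)],
          ([] : List Char)) = (ch ++ [PySem.Chars.join [' '] (gr ++ [l])], pvGlue []) := by
        rw [hcur, pv_strip_glue _ hgr']; rfl
      rw [this, ih _ [] (by simp) (fun x hx => hbs x (by simp [hx]))]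
      simp
    · rw [if_neg hc, if_neg hc]
      have : (ch, pvGlue gr ++ ' ' :: l) = (ch, pvGlue (gr ++ [l])) := by rw [hcur]
      rw [this, ih _ _ hgr' (fun x hx => hbs x (by simp [hx]))]

-- the unfolding equation of pvSplitChunks
theorem pvSplitChunks_eq (ls : List (List Char)) : pvSplitChunks ls =
    match pvFirstBreak 0 ls with
    | some i => PySem.Chars.join [' '] (ls.take (i + 1)) :: pvSplitChunks (ls.drop (i + 1))
    | none => if ls ≠ [] then [PySem.Chars.join [' '] ls] else [] := by
  rw [pvSplitChunks]
  cases h : pvFirstBreak 0 ls <;> simp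

-- pvGo against B's boundary scan
theorem pv_go_split : ∀ (bs gr : List (List Char)),
    pvGo gr bs =
      (match pvFirstBreak (pvGlue gr).length bs with
       | some i => PySem.Chars.join [' '] (gr ++ bs.take (i + 1)) ::
           pvSplitChunks (bs.drop (i + 1))
       | none => if gr ++ bs = [] then [] else [PySem.Chars.join [' '] (gr ++ bs)]) := by
  intro bs
  induction bs with
  | nil =>
    intro gr
    show pvGo gr [] = _
    cases gr with
    | nil => rfl
    | cons g gs => simp [pvGo, pvFirstBreak]
  | cons l rest ih =>
    intro gr
    have hlen : (pvGlue gr).length + l.length + 1 = (pvGlue (gr ++ [l])).length := by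
      rw [pv_glue_append]; simp; omega
    show pvGo gr (l :: rest) = _
    rw [pvGo, pvFirstBreak]
    simp only [hlen]
    by_cases hc : (decide (50 < (pvGlue (gr ++ [l])).length) && pvPunct l) = true
    · rw [if_pos hc, if_pos hc]
      have hrest : pvGo [] rest = pvSplitChunks rest := by
        rw [ih [], pvSplitChunks_eq rest]
        have : (pvGlue ([] : List (List Char))).length = 0 := rfl
        rw [this]
        cases h : pvFirstBreak 0 rest with
        | some i => simp
        | none =>
          by_cases hr : rest = []
          · simp [hr]
          · simp [hr]
      rw [hrest]
      simp
    · rw [if_neg hc, if_neg hc]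
      rw [ih (gr ++ [l])]
      cases h : pvFirstBreak (pvGlue (gr ++ [l])).length rest with
      | some j =>
        simp only [Option.map_some]
        have ht : (l :: rest).take (j + 1 + 1) = l :: rest.take (j + 1) := rfl
        have hd : (l :: rest).drop (j + 1 + 1) = rest.drop (j + 1) := rfl
        rw [ht, hd]
        simp
      | none =>
        simp only [Option.map_none]
        have h1 : gr ++ [l] ++ rest = gr ++ l :: rest := by simp
        have h2 : gr ++ [l] ++ rest ≠ [] := by simp
        rw [if_neg h2, if_neg (by simp : ¬ gr ++ l :: rest = []), h1]

theorem pv_go_nil (bs : List (List Char)) : pvGo [] bs = pvSplitChunks bs := by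
  rw [pv_go_split bs [], pvSplitChunks_eq bs]
  have : (pvGlue ([] : List (List Char))).length = 0 := rfl
  rw [this]
  cases h : pvFirstBreak 0 bs with
  | some i => simp
  | none =>
    by_cases hb : bs = []
    · simp [hb]
    · simp [hb]

-- A's second loop = append the filtered >15-char lines
theorem pv_loop2 (ls : List (List Char)) : ∀ ch : List (List Char),
    ls.foldl (fun c raw =>
      let line := PySem.Chars.strip raw
      if 15 < line.length then c ++ [line] else c) ch
    = ch ++ (ls.map PySem.Chars.strip).filter (fun l => decide (15 < l.length)) := by
  induction ls with
  | nil => intro ch; simp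
  | cons r t ih =>
    intro ch
    by_cases h : 15 < (PySem.Chars.strip r).length
    · simp [h, ih]
    · simp [h, ih]

theorem pv_big_ok (lines : List (List Char)) :
    ∀ l ∈ (lines.map PySem.Chars.strip).filter (fun l => decide (5 < l.length)), pvOk l := by
  intro l hl
  obtain ⟨hmem, hlen⟩ := List.mem_filter.mp hl
  obtain ⟨raw, _, rfl⟩ := List.mem_map.mp hmem
  have : PySem.Chars.strip raw ≠ [] := by
    intro hx
    rw [hx] at hlen
    simp at hlen
  exact pv_ok_strip raw this

-- ===== VERDICT (by name: the statement is the Claim_ definition above) =====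
theorem create_context_chunks_py_spec : Claim_equal_create_context_chunks_py := by
  intro context _
  show create_context_chunks_py context = create_context_chunks_py_alt context
  rw [create_context_chunks_py, create_context_chunks_py_alt]
  simp only
  set L := PySem.Chars.splitOn context.toList ['\n'] with hL
  set big := (L.map PySem.Chars.strip).filter (fun l => decide (5 < l.length)) with hbig
  have h1 : L.foldl pvAstep ([], []) = big.foldl pvCore ([], pvGlue []) :=
    pv_filter_fold L ([], [])
  have h2 : pvFin (big.foldl pvCore ([], pvGlue [])) = [] ++ pvGo [] big :=
    pv_core_go big [] [] (by simp) (pv_big_ok L)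
  have h3 : pvFin (L.foldl pvAstep ([], [])) = pvSplitChunks big := by
    rw [h1, h2, pv_go_nil]; rfl
  rw [show (if PySem.Chars.strip (L.foldl pvAstep ([], [])).2 ≠ [] then
      (L.foldl pvAstep ([], [])).1 ++ [PySem.Chars.strip (L.foldl pvAstep ([], [])).2]
      else (L.foldl pvAstep ([], [])).1) = pvFin (L.foldl pvAstep ([], [])) from rfl]
  rw [h3, pv_loop2]
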